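-- pv_equiv track=rewrite | github.com/maxim218/ivelum-news-proxy | server.py | calc_len_of_page_element
-- ===== SOURCE A (Python) =====
-- def has_string_not_opened_tag(string_with_tag):
--     length = len(string_with_tag)
--     for i in range(0, length):
--         current_char = string_with_tag[i]
--         if('<' == current_char):
--             return False
--         if('>' == current_char):
--             return True
--     return False
--
-- def delete_tag_from_string(string_with_tag):
--     if(has_string_not_opened_tag(string_with_tag)):
--         string_with_tag = '<' + string_with_tag
--     buf_string = ""
--     flag_add = True
--     length = len(string_with_tag)
--     for i in range(0, length):
--         current_char = string_with_tag[i]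
--         if('<' == current_char):
--             flag_add = False
--             continue
--         if('>' == current_char):
--             flag_add = True
--             continue
--         if(flag_add):
--             buf_string += current_char
--     return buf_string
--
-- def calc_len_of_page_element(string_element):
--     buf_string = str(string_element)
--
--     chars_prohibited = [' ', ',', '.', '"', '\t', '\n', "'"]
--     for i in range(0, len(chars_prohibited)):
--         current = chars_prohibited[i]
--         buf_string = "".join(buf_string.split(current))
--
--     buf_string = delete_tag_from_string(buf_string)
--
--     length = len(buf_string)
--     return length
-- ===== SOURCE B (Python) =====
-- def calc_len_of_page_element(string_element):
--     # One pass: skip prohibited chars, track inside-tag state, count; no intermediate strings.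
--     prohibited = " ,.\"\t\n'"
--     inside = False
--     seen = False          # have we met a tag character yet?
--     count = 0
--     for c in str(string_element):
--         if c in prohibited:
--             continue
--         if c == '<':
--             inside = True
--             seen = True
--         elif c == '>':
--             if not seen:       # a '>' before any '<': everything before it was inside a tag
--                 count = 0
--             inside = False
--             seen = True
--         elif not inside:
--             count += 1
--     return count
-- ===== Notes on version B (the rewrite author's own statement) =====
-- stated objective: faster
-- what changed: Replaced the seven split/join passes plus a tag-stripping string builder by a single pass that tracks inside-tag state and counts non-prohibited characters without building any intermediate strings.
import Mathlib
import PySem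

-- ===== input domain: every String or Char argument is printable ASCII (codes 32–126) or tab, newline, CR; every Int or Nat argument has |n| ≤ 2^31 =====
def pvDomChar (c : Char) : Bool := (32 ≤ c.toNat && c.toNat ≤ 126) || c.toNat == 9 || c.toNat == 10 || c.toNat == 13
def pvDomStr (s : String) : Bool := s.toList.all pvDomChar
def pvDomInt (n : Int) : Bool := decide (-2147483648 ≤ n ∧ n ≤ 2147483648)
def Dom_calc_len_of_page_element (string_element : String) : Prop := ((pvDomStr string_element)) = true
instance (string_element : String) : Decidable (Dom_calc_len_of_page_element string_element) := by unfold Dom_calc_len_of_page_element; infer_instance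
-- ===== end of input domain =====

-- B replaces A's seven split/join passes plus a tag-stripping string builder by a single
-- counting pass over the characters (no intermediate strings); objective: faster.


-- the literal list chars_prohibited = [' ', ',', '.', '"', '\t', '\n', "'"] (B's string holds the same chars)
def pvProhibited : List Char := [' ', ',', '.', '"', '\t', '\n', '\'']

-- ===== PORT A =====
-- has_string_not_opened_tag: scan for the first '<' or '>'
def pvHasNotOpened : List Char → Bool
  | [] => false
  | c :: rest => if c = '<' then false else if c = '>' then true else pvHasNotOpened rest

-- the loop of delete_tag_from_string: build buf_string with the flag_add state
def pvDtagLoop : List Char → List Char → Bool → List Char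
  | [], buf, _ => buf
  | c :: rest, buf, flag =>
    if c = '<' then pvDtagLoop rest buf false
    else if c = '>' then pvDtagLoop rest buf true
    else if flag then pvDtagLoop rest (buf ++ [c]) flag
    else pvDtagLoop rest buf flag

def pvDeleteTag (cs : List Char) : List Char :=
  let cs' := if pvHasNotOpened cs then '<' :: cs else cs
  pvDtagLoop cs' [] true

def calc_len_of_page_element (string_element : String) : Int :=
  -- for each prohibited char: buf_string = "".join(buf_string.split(current))
  let buf := pvProhibited.foldl
    (fun b current => PySem.Chars.join [] (PySem.Chars.splitOn b [current])) string_element.toList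
  ((pvDeleteTag buf).length : Int)

-- ===== PORT B =====
-- one pass: (inside, seen, count) state, exactly Source B's loop
def pvAltLoop : List Char → Bool → Bool → Nat → Nat
  | [], _, _, count => count
  | c :: rest, inside, seen, count =>
    if pvProhibited.contains c then pvAltLoop rest inside seen count
    else if c = '<' then pvAltLoop rest true true count
    else if c = '>' then pvAltLoop rest false true (if seen then count else 0)
    else if inside then pvAltLoop rest inside seen count
    else pvAltLoop rest inside seen (count + 1)

def calc_len_of_page_element_alt (string_element : String) : Int :=
  (pvAltLoop string_element.toList false false 0 : Nat)

-- ===== PRECONDITION & SPEC =====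
def Spec_calc_len_of_page_element (string_element : String) (out : Int) : Prop := out = calc_len_of_page_element_alt string_element
instance (string_element : String) (out : Int) : Decidable (Spec_calc_len_of_page_element string_element out) := by unfold Spec_calc_len_of_page_element; infer_instance

-- ===== CLAIM (what is proved, stated in full; the proofs are below) =====
def Claim_equal_calc_len_of_page_element : Prop := ∀ (string_element : String), Dom_calc_len_of_page_element string_element → Spec_calc_len_of_page_element string_element (calc_len_of_page_element string_element)

-- ===== LEMMAS AND PROOFS =====

-- invariant of splitOn's worker: flattening its output appends the filtered remainder
lemma pv_go_flatten (a : Char) :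
    ∀ (fuel : Nat) (l cur : List Char) (accs : List (List Char)), l.length < fuel →
      (PySem.Chars.splitOn.go [a] fuel l cur accs).flatten =
        accs.reverse.flatten ++ cur.reverse ++ l.filter (· ≠ a) := by
  intro fuel
  induction fuel with
  | zero => intro l cur accs h; omega
  | succ n ih =>
    intro l cur accs h
    match l with
    | [] => simp [PySem.Chars.splitOn.go]
    | c :: rest =>
      rw [PySem.Chars.splitOn.go]
      by_cases hc : c = a
      · subst hc
        have hp : List.isPrefixOf [c] (c :: rest) = true := by simp [List.isPrefixOf]
        simp only [hp, if_true]
        rw [ih _ _ _ (by simpa using Nat.lt_of_succ_lt_succ h)]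
        simp
      · have hp : List.isPrefixOf [a] (c :: rest) = false := by
          simp [List.isPrefixOf]; exact fun h' => hc h'.symm
        simp only [hp, Bool.false_eq_true, if_false]
        rw [ih _ _ _ (by simpa using Nat.lt_of_succ_lt_succ h)]
        simp [hc]

lemma pv_join_nil (parts : List (List Char)) : PySem.Chars.join [] parts = parts.flatten := by
  simp only [PySem.Chars.join]
  induction parts with
  | nil => rfl
  | cons p ps ih => cases ps <;> simp_all [List.intercalate]

-- "".join(s.split(c)) removes every occurrence of c
lemma pv_joinSplit (a : Char) (cs : List Char) :
    PySem.Chars.join [] (PySem.Chars.splitOn cs [a]) = cs.filter (· ≠ a) := by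
  rw [pv_join_nil, PySem.Chars.splitOn, pv_go_flatten a (cs.length + 1) cs [] [] (by omega)]
  simp

-- the seven split/join passes = one filter
lemma pv_removeAll (cs : List Char) :
    pvProhibited.foldl (fun b current => PySem.Chars.join [] (PySem.Chars.splitOn b [current])) cs
      = cs.filter (fun c => !pvProhibited.contains c) := by
  simp only [pvProhibited, List.foldl, pv_joinSplit, List.filter_filter]
  apply List.filter_congr
  intro c _
  simp only [List.contains_cons, List.contains_nil, Bool.or_false, Bool.not_or]
  simp only [ne_eq, decide_not]
  ac_rfl

-- length of A's tag loop: the accumulator only contributes its length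
lemma pvDtagLoop_len_acc : ∀ (cs buf : List Char) (flag : Bool),
    (pvDtagLoop cs buf flag).length = buf.length + (pvDtagLoop cs [] flag).length := by
  intro cs
  induction cs with
  | nil => simp [pvDtagLoop]
  | cons c rest ih =>
    intro buf flag
    rw [pvDtagLoop, pvDtagLoop]
    split_ifs with h1 h2 h3
    · exact ih buf false
    · exact ih buf true
    · rw [ih (buf ++ [c]) flag]; simp only [List.nil_append]; rw [ih [c] flag]; simp; omega
    · exact ih buf flag

-- proof-side abbreviation: number of chars A's tag loop keeps, starting with flag_add = flag
def pvBL (cs : List Char) (flag : Bool) : Nat := (pvDtagLoop cs [] flag).length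

-- B skipping prohibited chars = filtering them out first
lemma pvAltLoop_filter : ∀ (cs : List Char) (inside seen : Bool) (count : Nat),
    pvAltLoop cs inside seen count
      = pvAltLoop (cs.filter (fun c => !pvProhibited.contains c)) inside seen count := by
  intro cs
  induction cs with
  | nil => simp
  | cons c rest ih =>
    intro inside seen count
    by_cases h : pvProhibited.contains c = true
    · have h' : c ∈ pvProhibited := by simpa using h
      simp [pvAltLoop, h', ih]
    · simp only [List.filter_cons, h]
      simp only [Bool.not_false, if_true, pvAltLoop, h, Bool.false_eq_true, if_false]
      split_ifs <;> apply ih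

-- after the first tag char, B counts exactly what A's loop keeps
lemma pvAltLoop_seen : ∀ (cs : List Char), (∀ c ∈ cs, pvProhibited.contains c = false) →
    ∀ (b : Bool) (count : Nat), pvAltLoop cs b true count = count + pvBL cs !b := by
  intro cs
  induction cs with
  | nil => simp [pvAltLoop, pvBL, pvDtagLoop]
  | cons c rest ih =>
    intro h b count
    have hc : pvProhibited.contains c = false := h c (by simp)
    have hrest : ∀ c ∈ rest, pvProhibited.contains c = false := fun x hx => h x (by simp [hx])
    rw [pvAltLoop, hc]
    simp only [Bool.false_eq_true, if_false]
    by_cases h1 : c = '<'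
    · subst h1
      simp only [if_true]
      rw [ih hrest true count]
      simp [pvBL, pvDtagLoop]
    · by_cases h2 : c = '>'
      · subst h2
        simp only [h1, if_false, if_true]
        rw [ih hrest false count]
        simp [pvBL, pvDtagLoop]
      · simp only [h1, h2, if_false]
        cases b with
        | true =>
          simp only [if_true]
          rw [ih hrest true count]
          simp [pvBL, pvDtagLoop, h1, h2]
        | false =>
          simp only [Bool.false_eq_true, if_false]
          rw [ih hrest false (count + 1)]
          simp only [pvBL, pvDtagLoop, h1, h2, if_false, if_true, Bool.not_false]
          rw [List.nil_append, pvDtagLoop_len_acc rest [c] true]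
          simp; omega

-- before any tag char: the not-opened-tag correction
lemma pvAltLoop_unseen : ∀ (cs : List Char), (∀ c ∈ cs, pvProhibited.contains c = false) →
    ∀ (count : Nat), pvAltLoop cs false false count
      = if pvHasNotOpened cs then pvBL cs false else count + pvBL cs true := by
  intro cs
  induction cs with
  | nil => simp [pvAltLoop, pvHasNotOpened, pvBL, pvDtagLoop]
  | cons c rest ih =>
    intro h count
    have hc : pvProhibited.contains c = false := h c (by simp)
    have hrest : ∀ c ∈ rest, pvProhibited.contains c = false := fun x hx => h x (by simp [hx])
    rw [pvAltLoop, hc]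
    simp only [Bool.false_eq_true, if_false]
    by_cases h1 : c = '<'
    · subst h1
      simp only [if_true]
      rw [pvAltLoop_seen rest hrest true count]
      simp [pvHasNotOpened, pvBL, pvDtagLoop]
    · by_cases h2 : c = '>'
      · subst h2
        simp only [h1, if_false, if_true]
        rw [pvAltLoop_seen rest hrest false 0]
        simp [pvHasNotOpened, pvBL, pvDtagLoop]
      · simp only [h1, h2, if_false]
        rw [ih hrest (count + 1)]
        simp only [pvHasNotOpened, pvBL, pvDtagLoop, h1, h2, if_false, if_true]
        by_cases h3 : pvHasNotOpened rest = true
        · simp [h3]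
        · simp only [h3, Bool.false_eq_true, if_false]
          rw [List.nil_append, pvDtagLoop_len_acc rest [c] true]
          simp; omega

-- ===== VERDICT (by name: the statement is the Claim_ definition above) =====
theorem calc_len_of_page_element_spec : Claim_equal_calc_len_of_page_element := by
  intro s _
  unfold Spec_calc_len_of_page_element calc_len_of_page_element calc_len_of_page_element_alt
  rw [pv_removeAll, pvAltLoop_filter]
  set fl := s.toList.filter (fun c => !pvProhibited.contains c) with hfl
  have hclean : ∀ c ∈ fl, pvProhibited.contains c = false := by
    intro c hc
    rw [hfl] at hc
    simpa using (List.mem_filter.mp hc).2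
  rw [pvAltLoop_unseen fl hclean 0]
  unfold pvDeleteTag
  by_cases h : pvHasNotOpened fl = true
  · simp only [h, if_true]
    have : pvDtagLoop ('<' :: fl) [] true = pvDtagLoop fl [] false := by
      simp [pvDtagLoop]
    rw [this]
    rfl
  · simp only [h, if_false, Bool.false_eq_true]
    simp [pvBL]
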